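-- pv_equiv track=rewrite | github.com/odm94/CrocInvestmentFund | src/security.py | validate_stock_symbol
-- ===== SOURCE A (Python) =====
-- def validate_stock_symbol(symbol: str) -> bool:
--     """Validate stock symbol input"""
--     if not symbol:
--         return False
--
--     # Basic validation
--     if len(symbol) > 10:
--         return False
--
--     # Check for dangerous characters
--     dangerous_chars = ['<', '>', '"', "'", '&', ';', '(', ')', '|', '`']
--     if any(char in symbol for char in dangerous_chars):
--         return False
--
--     # Check if alphanumeric (with some exceptions)
--     if not symbol.replace('.', '').replace('-', '').isalnum():
--         return False
--
--     return True
-- ===== SOURCE B (Python) =====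
-- def validate_stock_symbol(symbol: str) -> bool:
--     """Validate stock symbol input: single pass over the characters."""
--     if not symbol:
--         return False
--     if len(symbol) > 10:
--         return False
--     kept = 0
--     for ch in symbol:
--         if ch == '.' or ch == '-':
--             continue
--         if not ch.isalnum():
--             return False
--         kept += 1
--     return kept > 0
-- ===== Notes on version B (the rewrite author's own statement) =====
-- stated objective: simpler
-- what changed: B replaces A's three separate scans (a membership scan per dangerous character, two full replace() passes and an isalnum() pass) with one single loop over the characters that skips '.'/'-', rejects at the first non-alphanumeric character, and counts kept characters; the dangerous-character blacklist disappears because none of those characters is alphanumeric.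
import Mathlib
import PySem

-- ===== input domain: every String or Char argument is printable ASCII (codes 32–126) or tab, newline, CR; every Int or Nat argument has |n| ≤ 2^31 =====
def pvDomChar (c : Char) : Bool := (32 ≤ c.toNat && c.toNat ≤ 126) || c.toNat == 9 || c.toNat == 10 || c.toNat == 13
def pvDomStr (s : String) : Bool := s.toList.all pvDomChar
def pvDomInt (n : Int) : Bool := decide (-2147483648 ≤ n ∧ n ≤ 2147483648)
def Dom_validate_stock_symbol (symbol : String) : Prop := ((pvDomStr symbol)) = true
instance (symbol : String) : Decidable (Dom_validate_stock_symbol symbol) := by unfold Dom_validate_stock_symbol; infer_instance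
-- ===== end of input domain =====

-- B validates in one loop over the characters (skip '.'/'-', require isalnum, count kept chars)
-- instead of A's blacklist scan plus two replace() passes plus str.isalnum(); simpler, same O(n).


-- ===== PORT A =====
def validate_stock_symbol (symbol : String) : Bool :=
  if symbol = "" then false
  else if PySem.Str.len symbol > 10 then false
  else if ['<', '>', '"', '\'', '&', ';', '(', ')', '|', '`'].any
            (fun c => PySem.Str.isIn (String.ofList [c]) symbol) then false
  else if !(PySem.Str.strIsalnum (PySem.Str.replace (PySem.Str.replace symbol "." "") "-" "")) then false
  else true

-- ===== PORT B =====
-- the for-loop of Source B: early return false on a non-alnum kept char, else count kept chars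
def vssAltLoop : List Char → Nat → Bool
  | [], kept => decide (kept > 0)
  | c :: cs, kept =>
    if c = '.' ∨ c = '-' then vssAltLoop cs kept
    else if !(PySem.Chars.isalnum c) then false
    else vssAltLoop cs (kept + 1)

def validate_stock_symbol_alt (symbol : String) : Bool :=
  if symbol = "" then false
  else if PySem.Str.len symbol > 10 then false
  else vssAltLoop symbol.toList 0

-- ===== PRECONDITION & SPEC =====
def Spec_validate_stock_symbol (symbol : String) (out : Bool) : Prop := out = validate_stock_symbol_alt symbol
instance (symbol : String) (out : Bool) : Decidable (Spec_validate_stock_symbol symbol out) := by unfold Spec_validate_stock_symbol; infer_instance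

-- ===== CLAIM (what is proved, stated in full; the proofs are below) =====
def Claim_equal_validate_stock_symbol : Prop := ∀ (symbol : String), Dom_validate_stock_symbol symbol → Spec_validate_stock_symbol symbol (validate_stock_symbol symbol)

-- ===== LEMMAS AND PROOFS =====

-- the characters B keeps (not '.' and not '-')
def vssKeep (c : Char) : Bool := !(c = '.' || c = '-')

-- replacing a single character by the empty string is filtering it out
theorem vss_replace_go_single (d : Char) (l acc : List Char) (fuel : Nat)
    (h : l.length ≤ fuel) :
    PySem.Chars.replace.go [d] [] fuel l acc = acc.reverse ++ l.filter (fun c => !(c == d)) := by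
  induction l generalizing fuel acc with
  | nil =>
    cases fuel <;> simp [PySem.Chars.replace.go]
  | cons c t ih =>
    cases fuel with
    | zero => simp at h
    | succ n =>
      simp only [PySem.Chars.replace.go]
      by_cases hc : c = d
      · subst hc
        have hpre : List.isPrefixOf [c] (c :: t) = true := by simp [List.isPrefixOf]
        rw [if_pos hpre]
        simp only [List.length_cons, List.length_nil, Nat.zero_add, List.drop_succ_cons,
          List.drop_zero, List.reverse_nil, List.nil_append]
        rw [ih acc n (by simpa using Nat.le_of_succ_le_succ h)]
        simp
      · have hpre : List.isPrefixOf [d] (c :: t) = false := by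
          simp only [List.isPrefixOf, Bool.and_eq_false_iff]
          left
          simp only [beq_eq_false_iff_ne, ne_eq]
          exact fun h' => hc h'.symm
        rw [if_neg (by simp [hpre])]
        rw [ih (c :: acc) n (by simpa using Nat.le_of_succ_le_succ h)]
        simp [hc]

theorem vss_replace_single (d : Char) (l : List Char) :
    PySem.Chars.replace l [d] [] = l.filter (fun c => !(c == d)) := by
  rw [PySem.Chars.replace, if_neg (by simp)]
  exact vss_replace_go_single d l [] l.length (le_refl _)

-- B's loop computed in closed form
theorem vssAltLoop_spec (l : List Char) (kept : Nat) :
    vssAltLoop l kept =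
      ((l.filter vssKeep).all PySem.Chars.isalnum && decide (kept + (l.filter vssKeep).length > 0)) := by
  induction l generalizing kept with
  | nil => simp [vssAltLoop]
  | cons c t ih =>
    by_cases hc : c = '.' ∨ c = '-'
    · have hk : vssKeep c = false := by
        rcases hc with h | h <;> subst h <;> decide
      rw [vssAltLoop, if_pos hc, ih]
      simp [List.filter_cons, hk]
    · have hk : vssKeep c = true := by
        push_neg at hc
        simp [vssKeep, hc.1, hc.2]
      by_cases ha : PySem.Chars.isalnum c
      · rw [vssAltLoop, if_neg hc, if_neg (by simp [ha]), ih]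
        simp only [List.filter_cons, hk, if_pos, List.all_cons, ha, Bool.true_and,
          List.length_cons]
        congr 1
        have harith : kept + 1 + (List.filter vssKeep t).length
            = kept + ((List.filter vssKeep t).length + 1) := by omega
        rw [harith]
      · rw [vssAltLoop, if_neg hc, if_pos (by simp [ha])]
        simp [List.filter_cons, hk, ha]

-- a kept non-alnum character makes the filtered-all-isalnum test false
theorem vss_mem_not_alnum (l : List Char) (d : Char) (hd : d ∈ l)
    (hk : vssKeep d = true) (ha : PySem.Chars.isalnum d = false) :
    (l.filter vssKeep).all PySem.Chars.isalnum = false := by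
  have : d ∈ l.filter vssKeep := List.mem_filter.mpr ⟨hd, hk⟩
  by_contra hne
  have hall : (l.filter vssKeep).all PySem.Chars.isalnum = true := by
    cases hb : (l.filter vssKeep).all PySem.Chars.isalnum
    · exact absurd hb hne
    · rfl
  have := (List.all_eq_true.mp hall) d this
  rw [ha] at this
  exact Bool.false_ne_true this

-- ===== VERDICT (by name: the statement is the Claim_ definition above) =====
theorem validate_stock_symbol_spec : Claim_equal_validate_stock_symbol := by
  intro symbol _
  unfold Spec_validate_stock_symbol validate_stock_symbol validate_stock_symbol_alt
  by_cases h0 : symbol = ""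
  · simp [h0]
  by_cases h1 : PySem.Str.len symbol > 10
  · rw [if_neg (by simpa using h0), if_pos h1, if_neg (by simpa using h0), if_pos h1]
  simp only [if_neg h0, if_neg h1]
  -- both replace passes are filters; the composed filter is the filter by vssKeep
  have hrep : (PySem.Str.replace (PySem.Str.replace symbol "." "") "-" "").toList
      = symbol.toList.filter vssKeep := by
    simp only [PySem.Str.toList_replace]
    have hd : ("." : String).toList = ['.'] := rfl
    have he : ("" : String).toList = [] := rfl
    have hm : ("-" : String).toList = ['-'] := rfl
    rw [hd, he, hm, vss_replace_single, vss_replace_single, List.filter_filter]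
    apply List.filter_congr
    intro c _
    by_cases h1 : c = '.' <;> by_cases h2 : c = '-' <;> simp [vssKeep, h1, h2]
  by_cases hdng : (['<', '>', '"', '\'', '&', ';', '(', ')', '|', '`'].any
      (fun c => PySem.Str.isIn (String.ofList [c]) symbol)) = true
  · -- a dangerous character is present: both sides return false
    simp only [hdng, if_pos]
    rw [vssAltLoop_spec]
    simp only [List.any_eq_true] at hdng
    obtain ⟨d, hdmem, hdin⟩ := hdng
    have hmem : d ∈ symbol.toList := by
      have h' := (PySem.Str.isIn_iff_infix _ _).mp hdin
      have h2 : [d] <:+: symbol.toList := by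
        rwa [String.toList_ofList] at h'
      obtain ⟨s, t, hst⟩ := h2
      rw [← hst]; simp
    have hk : vssKeep d = true := by
      fin_cases hdmem <;> decide
    have ha : PySem.Chars.isalnum d = false := by
      fin_cases hdmem <;> decide
    rw [vss_mem_not_alnum symbol.toList d hmem hk ha]
    simp
  · rw [if_neg hdng]
    rw [vssAltLoop_spec, PySem.Str.strIsalnum_eq, hrep]
    by_cases hall : (symbol.toList.filter vssKeep).all PySem.Chars.isalnum
    · simp only [PySem.Chars.strIsalnum, hall, Bool.and_true, Bool.true_and, Bool.not_not,
        Nat.zero_add]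
      by_cases hemp : (symbol.toList.filter vssKeep) = []
      · simp [hemp]
      · simp [List.isEmpty_iff, hemp, List.length_pos_iff]
    · simp [PySem.Chars.strIsalnum, hall]
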